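-- pv_equiv track=rewrite | github.com/tinglab/kLDM | hierarchical_server/utils.py | filterOTUNames
-- ===== SOURCE A (Python) =====
-- def filterOTUNames(otu_name_list):
--     new_name = []
--     for per_name in otu_name_list:
--         per_splits = per_name.split(";")
--         split_num = len(per_splits)
--         need_num = 2
--         per_new_name = ""
--         i = split_num - 1
--         while i > -1:
--             if len(per_splits[i]) > 3:
--                 need_num -= 1
--                 per_new_name = per_splits[i] + "; "+ per_new_name
--                 if need_num == 0:
--                     break
--
--             i -= 1;
--
--         new_name.append(per_new_name)
--
--     return new_name
-- ===== SOURCE B (Python) =====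
-- def filterOTUNames(otu_name_list):
--     # Simpler: filter the long segments forward, keep the last two by slicing,
--     # and join them each followed by "; ".
--     return ["".join(s + "; " for s in
--                     [s for s in per_name.split(";") if len(s) > 3][-2:])
--             for per_name in otu_name_list]
-- ===== Notes on version B (the rewrite author's own statement) =====
-- stated objective: simpler
-- what changed: Replaces the backward index scan with a decrementing need-counter and early break by a forward filter of the long segments, a [-2:] slice, and a join with trailing '; '.
import Mathlib
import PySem

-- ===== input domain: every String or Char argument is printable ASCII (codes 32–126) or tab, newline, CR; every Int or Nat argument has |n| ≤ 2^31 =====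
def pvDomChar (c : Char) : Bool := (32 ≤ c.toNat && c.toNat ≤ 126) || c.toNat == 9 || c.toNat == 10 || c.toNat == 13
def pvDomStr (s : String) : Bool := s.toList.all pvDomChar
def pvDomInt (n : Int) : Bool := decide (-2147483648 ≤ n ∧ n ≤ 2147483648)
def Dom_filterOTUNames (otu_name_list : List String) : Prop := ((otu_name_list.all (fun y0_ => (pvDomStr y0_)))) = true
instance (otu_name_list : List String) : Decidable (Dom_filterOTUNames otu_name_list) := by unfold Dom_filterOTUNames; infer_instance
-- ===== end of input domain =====

-- B replaces A's backward scan with need-counter and early break by a forward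
-- filter of the long segments, a [-2:] slice, and a join with trailing "; " (simpler).

-- ===== PORT A =====
-- A's inner while loop: i runs from split_num-1 down to -1 (fuel = i+1); the
-- index is always in range, so getD never takes its default.
def pvLoopA (segs : List String) : Nat → Int → String → String
  | 0, _, acc => acc
  | n+1, need, acc =>
    if PySem.Str.len (segs.getD n "") > 3 then
      if need - 1 == 0 then segs.getD n "" ++ "; " ++ acc
      else pvLoopA segs n (need - 1) (segs.getD n "" ++ "; " ++ acc)
    else pvLoopA segs n need acc

-- per_name.split(";"): ";" is a non-empty literal, so split? is always `some`
def filterOTUNames (otu_name_list : List String) : List String :=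
  otu_name_list.foldl (fun new_name per_name =>
    let per_splits := (PySem.Str.split? per_name ";").getD []
    new_name ++ [pvLoopA per_splits per_splits.length 2 ""]) []

-- ===== PORT B =====
def filterOTUNames_alt (otu_name_list : List String) : List String :=
  otu_name_list.map (fun per_name =>
    let longs := ((PySem.Str.split? per_name ";").getD []).filter
        (fun s => PySem.Str.len s > 3)
    PySem.Str.join "" ((PySem.List.slice longs (some (-2)) none).map (· ++ "; ")))

-- ===== PRECONDITION & SPEC =====
def Spec_filterOTUNames (otu_name_list : List String) (out : List String) : Prop := out = filterOTUNames_alt otu_name_list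
instance (otu_name_list : List String) (out : List String) : Decidable (Spec_filterOTUNames otu_name_list out) := by unfold Spec_filterOTUNames; infer_instance

-- ===== CLAIM (what is proved, stated in full; the proofs are below) =====
def Claim_equal_filterOTUNames : Prop := ∀ (otu_name_list : List String), Dom_filterOTUNames otu_name_list → Spec_filterOTUNames otu_name_list (filterOTUNames otu_name_list)

-- ===== LEMMAS AND PROOFS =====

-- "".join of (s ++ "; ") pieces, as in port B
def pvJT (l : List String) : String := PySem.Str.join "" (l.map (· ++ "; "))

lemma pvFlatten_intersperse_nil (l : List (List Char)) :
    (List.intersperse ([] : List Char) l).flatten = l.flatten := by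
  induction l with
  | nil => rfl
  | cons a t ih => cases t with
    | nil => rfl
    | cons b t2 => simp_all [List.intersperse]

lemma pvJT_nil : pvJT [] = "" := rfl

lemma pvJT_append_singleton (xs : List String) (s : String) :
    pvJT (xs ++ [s]) = pvJT xs ++ (s ++ "; ") := by
  simp [pvJT, PySem.Str.join, PySem.Chars.join, List.intercalate,
        pvFlatten_intersperse_nil, String.ofList_append]

-- loop invariant: the backward scan with need ∈ {2,1} collects the last
-- need > 3 segments of the processed prefix, each followed by "; "
lemma pvLoopA_eq (segs : List String) : ∀ n, n ≤ segs.length → ∀ acc : String,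
    (pvLoopA segs n 2 acc =
      pvJT ((((segs.take n).filter (fun s => PySem.Str.len s > 3)).drop
        (((segs.take n).filter (fun s => PySem.Str.len s > 3)).length - 2))) ++ acc) ∧
    (pvLoopA segs n 1 acc =
      pvJT ((((segs.take n).filter (fun s => PySem.Str.len s > 3)).drop
        (((segs.take n).filter (fun s => PySem.Str.len s > 3)).length - 1))) ++ acc) := by
  intro n
  induction n with
  | zero => intro _ acc; simp [pvLoopA, pvJT_nil, String.empty_append]
  | succ n ih =>
    intro hlt acc
    have hn : n < segs.length := by omega
    have hnle : n ≤ segs.length := by omega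
    have hgetD : segs.getD n "" = segs[n] := List.getD_eq_getElem segs "" hn
    have htake : segs.take (n+1) = segs.take n ++ [segs[n]] :=
      List.take_succ_eq_append_getElem hn
    set F := (segs.take n).filter (fun s => PySem.Str.len s > 3) with hF
    by_cases hp : PySem.Str.len segs[n] > 3
    · have hfilt : (segs.take (n+1)).filter (fun s => PySem.Str.len s > 3) = F ++ [segs[n]] := by
        rw [htake, List.filter_append, ← hF]
        simp only [List.filter_cons, List.filter_nil, decide_eq_true hp, if_true]
      have hlast1 : (F ++ [segs[n]]).drop ((F ++ [segs[n]]).length - 1) = [segs[n]] := by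
        simp only [List.length_append, List.length_singleton]
        have h1 : F.length + 1 - 1 = F.length := by omega
        rw [h1, List.drop_left]
      constructor
      · -- need = 2: recurse with need = 1
        show pvLoopA segs (n+1) 2 acc = _
        rw [pvLoopA]
        rw [hgetD, if_pos hp]
        simp only [show (2:Int) - 1 = 1 from rfl]
        rw [(ih hnle (segs[n] ++ "; " ++ acc)).2, hfilt]
        have hdrop2 : (F ++ [segs[n]]).drop ((F ++ [segs[n]]).length - 2)
            = F.drop (F.length - 1) ++ [segs[n]] := by
          simp only [List.length_append, List.length_singleton]
          have h1 : F.length + 1 - 2 = F.length - 1 := by omega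
          rw [h1, List.drop_append_of_le_length (by omega)]
        rw [hdrop2, pvJT_append_singleton]
        simp [String.append_assoc]
      · -- need = 1: break immediately
        show pvLoopA segs (n+1) 1 acc = _
        rw [pvLoopA]
        rw [hgetD, if_pos hp]
        simp only [show ((1:Int) - 1 == 0) = true from rfl, if_true]
        rw [hfilt, hlast1]
        simp [pvJT, PySem.Str.join, PySem.Chars.join, List.intercalate, String.ofList_append,
              String.append_assoc]
    · have hfilt : (segs.take (n+1)).filter (fun s => PySem.Str.len s > 3) = F := by
        rw [htake, List.filter_append, ← hF]
        simp only [List.filter_cons, List.filter_nil, decide_eq_false hp]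
        simp
      constructor
      · show pvLoopA segs (n+1) 2 acc = _
        rw [pvLoopA, hgetD, if_neg hp, (ih hnle acc).1, hfilt]
      · show pvLoopA segs (n+1) 1 acc = _
        rw [pvLoopA, hgetD, if_neg hp, (ih hnle acc).2, hfilt]

-- per-element agreement
lemma pvElem_eq (per_name : String) :
    (let per_splits := (PySem.Str.split? per_name ";").getD []
     pvLoopA per_splits per_splits.length 2 "") =
    (let longs := ((PySem.Str.split? per_name ";").getD []).filter
        (fun s => PySem.Str.len s > 3)
     PySem.Str.join "" ((PySem.List.slice longs (some (-2)) none).map (· ++ "; "))) := by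
  set segs := (PySem.Str.split? per_name ";").getD [] with hsegs
  have h := (pvLoopA_eq segs segs.length le_rfl "").1
  simp only [List.take_length] at h
  show pvLoopA segs segs.length 2 "" = _
  rw [h, String.append_empty]
  set longs := segs.filter (fun s => PySem.Str.len s > 3) with hlongs
  show pvJT (longs.drop (longs.length - 2)) =
    PySem.Str.join "" ((PySem.List.slice longs (some (-2)) none).map (· ++ "; "))
  rw [PySem.List.slice_from_neg_ofNat longs 2 (by omega)]
  rfl

-- ===== VERDICT (by name: the statement is the Claim_ definition above) =====
theorem filterOTUNames_spec : Claim_equal_filterOTUNames := by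
  intro l _
  unfold Spec_filterOTUNames filterOTUNames filterOTUNames_alt
  rw [PySem.List.foldl_append_singleton_eq_map]
  exact List.map_congr_left (fun per_name _ => pvElem_eq per_name)
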